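-- pv_equiv track=rewrite | github.com/Anselmoo/mcp-zen-of-languages | src/mcp_zen_of_languages/utils/markdown_quality.py | _tables_aligned
-- ===== SOURCE A (Python) =====
-- def _tables_aligned(lines: list[str]) -> bool:
--     """Confirm that every row within a Markdown table has the same number of columns.
--
--     Identifies table rows as lines starting and ending with ``|``, then
--     counts pipe characters per row. A column-count mismatch within a
--     contiguous table block indicates a formatting error.
--
--     Args:
--         lines: Pre-split Markdown lines to inspect.
--
--     Returns:
--         ``True`` when all rows in every table block share the same pipe
--         count, ``False`` on the first mismatch.
--     """
--
--     expected_columns: int | None = None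
--     for line in lines:
--         stripped = line.strip()
--         if "|" not in stripped:
--             expected_columns = None
--             continue
--         if not stripped.startswith("|") or not stripped.endswith("|"):
--             continue
--         columns = stripped.count("|")
--         if expected_columns is None:
--             expected_columns = columns
--             continue
--         if columns != expected_columns:
--             return False
--     return True
-- ===== SOURCE B (Python) =====
-- def _tables_aligned(lines: list[str]) -> bool:
--     """Tokenize lines (None = table-block separator, int = pipe count of a
--     table row, mid-pipe lines dropped), then check every adjacent pair of
--     tokens: counts inside the same block must be equal."""
--     toks = []
--     for line in lines:
--         s = line.strip()
--         if "|" not in s: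
--             toks.append(None)
--         elif s.startswith("|") and s.endswith("|"):
--             toks.append(s.count("|"))
--     return all(a is None or b is None or a == b for a, b in zip(toks, toks[1:]))
-- ===== Notes on version B (the rewrite author's own statement) =====
-- stated objective: alternative
-- what changed: Replaces the accumulator-threaded scan with early return by a tokenize-then-pairwise check: lines are mapped to tokens (separator / pipe count, mid-pipe lines dropped) and alignment is all adjacent token pairs agreeing.
import Mathlib
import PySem

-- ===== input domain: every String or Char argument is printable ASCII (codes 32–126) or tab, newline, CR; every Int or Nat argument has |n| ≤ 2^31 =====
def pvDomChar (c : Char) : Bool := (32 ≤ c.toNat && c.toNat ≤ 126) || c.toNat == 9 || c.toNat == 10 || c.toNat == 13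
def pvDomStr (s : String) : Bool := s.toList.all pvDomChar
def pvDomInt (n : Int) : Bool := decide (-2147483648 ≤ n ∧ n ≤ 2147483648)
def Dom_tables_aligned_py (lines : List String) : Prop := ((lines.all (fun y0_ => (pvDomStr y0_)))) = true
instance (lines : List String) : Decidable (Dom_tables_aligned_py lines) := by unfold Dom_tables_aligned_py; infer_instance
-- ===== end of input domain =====

-- B replaces A's accumulator-threaded scan by tokenize-then-pairwise-adjacent check (alternative decomposition, same cost).

-- ===== PORT A =====
-- literal port of A's loop: state = expected_columns (Option Nat), early return False on mismatch
def tablesAlignedGo : List String → Option Nat → Bool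
  | [], _ => true
  | line :: rest, expected =>
    let stripped := PySem.Str.strip line
    if PySem.Str.isIn "|" stripped = false then
      tablesAlignedGo rest none
    else if !(PySem.Str.startswith stripped "|") || !(PySem.Str.endswith stripped "|") then
      tablesAlignedGo rest expected
    else
      let columns := PySem.Str.count stripped "|"
      match expected with
      | none => tablesAlignedGo rest (some columns)
      | some e => if columns ≠ e then false else tablesAlignedGo rest expected

def tables_aligned_py (lines : List String) : Bool :=
  tablesAlignedGo lines none

-- ===== PORT B =====
-- token of a line: some none = block separator, some (some c) = table row with c pipes, none = dropped mid-pipe line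
def tablesTok (line : String) : Option (Option Nat) :=
  let s := PySem.Str.strip line
  if PySem.Str.isIn "|" s = false then some none
  else if PySem.Str.startswith s "|" && PySem.Str.endswith s "|" then some (some (PySem.Str.count s "|"))
  else none

def tablesPairOk (p : Option Nat × Option Nat) : Bool :=
  p.1.isNone || p.2.isNone || p.1 == p.2

def tables_aligned_py_alt (lines : List String) : Bool :=
  let toks := lines.filterMap tablesTok
  (toks.zip (toks.drop 1)).all tablesPairOk

-- ===== PRECONDITION & SPEC =====
def Spec_tables_aligned_py (lines : List String) (out : Bool) : Prop := out = tables_aligned_py_alt lines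
instance (lines : List String) (out : Bool) : Decidable (Spec_tables_aligned_py lines out) := by unfold Spec_tables_aligned_py; infer_instance

-- ===== CLAIM (what is proved, stated in full; the proofs are below) =====
def Claim_equal_tables_aligned_py : Prop := ∀ (lines : List String), Dom_tables_aligned_py lines → Spec_tables_aligned_py lines (tables_aligned_py lines)

-- ===== LEMMAS AND PROOFS =====

-- abstract version of A's loop over the token stream
def tablesCheck : Option Nat → List (Option Nat) → Bool
  | _, [] => true
  | _, none :: ts => tablesCheck none ts
  | expected, some c :: ts =>
    (match expected with | none => true | some e => c == e) && tablesCheck (some c) ts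

def tablesPairs (ts : List (Option Nat)) : Bool := (ts.zip (ts.drop 1)).all tablesPairOk

theorem tablesPairs_cons_cons (a b : Option Nat) (ts : List (Option Nat)) :
    tablesPairs (a :: b :: ts) = (tablesPairOk (a, b) && tablesPairs (b :: ts)) := rfl

theorem tablesPairs_none_cons (ts : List (Option Nat)) :
    tablesPairs (none :: ts) = tablesPairs ts := by
  cases ts with
  | nil => rfl
  | cons u ts' => rw [tablesPairs_cons_cons]; simp [tablesPairOk]

theorem tablesGo_eq_check (lines : List String) : ∀ expected : Option Nat,
    tablesAlignedGo lines expected = tablesCheck expected (lines.filterMap tablesTok) := by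
  induction lines with
  | nil => intro e; cases e <;> rfl
  | cons line rest ih =>
    intro expected
    by_cases h1 : PySem.Str.isIn "|" (PySem.Str.strip line) = false
    · have htok : tablesTok line = some none := by
        simp only [tablesTok]; rw [if_pos h1]
      rw [List.filterMap_cons, htok]
      simp only [tablesAlignedGo, tablesCheck]
      rw [if_pos h1]
      exact ih none
    · by_cases h2 : (!PySem.Str.startswith (PySem.Str.strip line) "|" ||
          !PySem.Str.endswith (PySem.Str.strip line) "|") = true
      · have hc2 : ¬ (PySem.Str.startswith (PySem.Str.strip line) "|" &&
              PySem.Str.endswith (PySem.Str.strip line) "|") = true := by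
          revert h2; cases PySem.Str.startswith (PySem.Str.strip line) "|" <;>
            cases PySem.Str.endswith (PySem.Str.strip line) "|" <;> simp
        have htok : tablesTok line = none := by
          simp only [tablesTok]; rw [if_neg h1, if_neg hc2]
        rw [List.filterMap_cons, htok]
        simp only [tablesAlignedGo]
        rw [if_neg h1, if_pos h2]
        exact ih expected
      · have hc2 : (PySem.Str.startswith (PySem.Str.strip line) "|" &&
              PySem.Str.endswith (PySem.Str.strip line) "|") = true := by
          revert h2; cases PySem.Str.startswith (PySem.Str.strip line) "|" <;>
            cases PySem.Str.endswith (PySem.Str.strip line) "|" <;> simp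
        have htok : tablesTok line =
            some (some (PySem.Str.count (PySem.Str.strip line) "|")) := by
          simp only [tablesTok]; rw [if_neg h1, if_pos hc2]
        rw [List.filterMap_cons, htok]
        simp only [tablesAlignedGo]
        rw [if_neg h1, if_neg h2]
        cases expected with
        | none =>
          simp only [tablesCheck, Bool.true_and]
          exact ih _
        | some e =>
          simp only [tablesCheck]
          by_cases hc : PySem.Str.count (PySem.Str.strip line) "|" = e
          · rw [if_neg (fun h => h hc), ih, hc]
            simp
          · rw [if_pos hc]
            have hbe : (PySem.Str.count (PySem.Str.strip line) "|" == e) = false :=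
              beq_eq_false_iff_ne.mpr hc
            rw [hbe, Bool.false_and]

theorem tablesCheck_eq_pairs (ts : List (Option Nat)) :
    (∀ c, tablesCheck (some c) ts = tablesPairs (some c :: ts)) ∧ tablesCheck none ts = tablesPairs ts := by
  induction ts with
  | nil => exact ⟨fun c => rfl, rfl⟩
  | cons t ts ih =>
    cases t with
    | none =>
      refine ⟨fun c => ?_, ?_⟩
      · rw [tablesCheck, ih.2, tablesPairs_cons_cons, tablesPairs_none_cons]
        simp [tablesPairOk]
      · rw [tablesCheck, ih.2, tablesPairs_none_cons]
    | some d =>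
      refine ⟨fun c => ?_, ?_⟩
      · rw [tablesCheck, ih.1 d, tablesPairs_cons_cons]
        have : (d == c) = (c == d) := by simp [Nat.beq_eq, eq_comm]
        rw [this]; simp [tablesPairOk]
      · rw [tablesCheck, ih.1 d]
        simp

-- ===== VERDICT (by name: the statement is the Claim_ definition above) =====
theorem tables_aligned_py_spec : Claim_equal_tables_aligned_py := by
  intro lines _
  unfold Spec_tables_aligned_py tables_aligned_py tables_aligned_py_alt
  rw [tablesGo_eq_check, (tablesCheck_eq_pairs _).2]
  rfl
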